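-- pv_equiv track=rewrite | github.com/MK-Lee13/Algorithm-Study | Programmers/level_2/48_menu_renewal.py | find
-- ===== SOURCE A (Python) =====
-- def find(count, answer_dict):
--     result = []
--     count_list = []
--     max_val = 2
--     for key in answer_dict:
--         if count != len(key):
--             continue
--         if answer_dict[key] >= 2:
--             count_list.append([key, answer_dict[key]])
--         if answer_dict[key] > max_val:
--             max_val = answer_dict[key]
--     for cnt in count_list:
--         if cnt[1] == max_val:
--             result.append(cnt[0])
--     return result
-- ===== SOURCE B (Python) =====
-- def find(count, answer_dict):
--     result = []
--     max_val = 2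
--     for key in answer_dict:
--         val = answer_dict[key]
--         if len(key) == count and val >= 2:
--             if val > max_val:
--                 result = [key]
--                 max_val = val
--             elif val == max_val:
--                 result.append(key)
--     return result
-- ===== Notes on version B (the rewrite author's own statement) =====
-- stated objective: simpler
-- what changed: Replaces A's two passes (collect all value>=2 candidates of the right length plus a separate running max, then filter the candidate list by the max) with a single pass maintaining the current best list and max directly, never materialising the candidate list.
import Mathlib
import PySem

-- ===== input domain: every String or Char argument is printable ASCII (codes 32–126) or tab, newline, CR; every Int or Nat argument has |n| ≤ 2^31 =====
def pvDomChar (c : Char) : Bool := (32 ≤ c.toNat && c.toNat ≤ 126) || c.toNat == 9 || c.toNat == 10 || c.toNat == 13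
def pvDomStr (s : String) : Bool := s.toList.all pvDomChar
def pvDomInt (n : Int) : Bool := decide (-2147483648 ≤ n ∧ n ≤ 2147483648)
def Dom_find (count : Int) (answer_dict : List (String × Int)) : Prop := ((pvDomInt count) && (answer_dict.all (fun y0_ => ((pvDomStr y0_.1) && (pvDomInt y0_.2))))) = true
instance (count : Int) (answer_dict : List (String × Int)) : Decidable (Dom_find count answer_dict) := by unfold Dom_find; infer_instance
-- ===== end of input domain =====

-- B makes one pass keeping a running best list instead of A's two passes (collect candidates + track max, then filter); objective: simpler.

-- ===== PORT A =====
-- first loop: builds count_list (pairs with value ≥ 2 at the right key length) and max_val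
def findStepA (count : Int) (st : List (String × Int) × Int) (kv : String × Int) :
    List (String × Int) × Int :=
  if count ≠ PySem.Str.len kv.1 then st
  else
    let st1 := if kv.2 ≥ 2 then (st.1 ++ [(kv.1, kv.2)], st.2) else st
    if kv.2 > st1.2 then (st1.1, kv.2) else st1

def find (count : Int) (answer_dict : List (String × Int)) : List String :=
  let p := answer_dict.foldl (findStepA count) ([], 2)
  p.1.foldl (fun result cnt => if cnt.2 = p.2 then result ++ [cnt.1] else result) []

-- ===== PORT B =====
-- single loop over the dict keeping (result, max_val)
def findStepB (count : Int) (st : List String × Int) (kv : String × Int) :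
    List String × Int :=
  if PySem.Str.len kv.1 = count ∧ kv.2 ≥ 2 then
    if kv.2 > st.2 then ([kv.1], kv.2)
    else if kv.2 = st.2 then (st.1 ++ [kv.1], st.2)
    else st
  else st

def find_alt (count : Int) (answer_dict : List (String × Int)) : List String :=
  (answer_dict.foldl (findStepB count) ([], 2)).1

-- ===== PRECONDITION & SPEC =====
def Spec_find (count : Int) (answer_dict : List (String × Int)) (out : List String) : Prop := out = find_alt count answer_dict
instance (count : Int) (answer_dict : List (String × Int)) (out : List String) : Decidable (Spec_find count answer_dict out) := by unfold Spec_find; infer_instance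

-- ===== CLAIM (what is proved, stated in full; the proofs are below) =====
def Claim_equal_find : Prop := ∀ (count : Int) (answer_dict : List (String × Int)), Dom_find count answer_dict → Spec_find count answer_dict (find count answer_dict)

-- ===== LEMMAS AND PROOFS =====

-- A's second loop is a filter-then-map
theorem filterLoop_eq (m : Int) (acc : List String) (cl : List (String × Int)) :
    cl.foldl (fun result cnt => if cnt.2 = m then result ++ [cnt.1] else result) acc
      = acc ++ ((cl.filter (fun cnt => cnt.2 = m)).map Prod.fst) := by
  induction cl generalizing acc with
  | nil => simp
  | cons kv tl ih =>
    simp only [List.foldl_cons, List.filter_cons]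
    by_cases h : kv.2 = m <;> simp [h, ih]

-- invariant relating the two folds
theorem fold_invariant (count : Int) (l : List (String × Int))
    (cl : List (String × Int)) (m : Int) (hm : 2 ≤ m)
    (hb : ∀ x ∈ cl, x.2 ≤ m) :
    let p := l.foldl (findStepA count) (cl, m)
    (l.foldl (findStepB count) ((cl.filter (fun c => c.2 = m)).map Prod.fst, m)
      = ((p.1.filter (fun c => c.2 = p.2)).map Prod.fst, p.2))
      ∧ m ≤ p.2 ∧ ∀ x ∈ p.1, x.2 ≤ p.2 := by
  induction l generalizing cl m with
  | nil => exact ⟨rfl, le_refl _, hb⟩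
  | cons kv tl ih =>
    simp only [List.foldl_cons]
    by_cases hlen : count = PySem.Str.len kv.1
    · have hlen' : (kv.1.length : Int) = count := by simpa using hlen.symm
      by_cases h2 : kv.2 ≥ 2
      · by_cases hgt : kv.2 > m
        · -- new maximum: B resets result to [kv.1]
          have hA : findStepA count (cl, m) kv = (cl ++ [(kv.1, kv.2)], kv.2) := by
            simp [findStepA, hlen, h2, hgt]
          have hB : findStepB count ((cl.filter (fun c => c.2 = m)).map Prod.fst, m) kv
              = ([kv.1], kv.2) := by
            simp [findStepB, hlen', h2, hgt]
          simp only [hA, hB]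
          have hfil : ((cl ++ [(kv.1, kv.2)]).filter (fun c => c.2 = kv.2)).map Prod.fst
              = [kv.1] := by
            have : cl.filter (fun c => c.2 = kv.2) = [] := by
              apply List.filter_eq_nil_iff.mpr
              intro x hx hx2
              have := hb x hx
              simp at hx2; omega
            simp [List.filter_append, this]
          have := ih (cl ++ [(kv.1, kv.2)]) kv.2 (by omega)
            (by intro x hx; rcases List.mem_append.mp hx with h | h
                · exact le_trans (hb x h) (le_of_lt hgt)
                · simp at h; simp [h])
          simp only [hfil] at this
          exact ⟨this.1, le_trans (le_of_lt hgt) this.2.1, this.2.2⟩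
        · -- kv.2 ≤ m, value appended to count_list, max unchanged
          have hA : findStepA count (cl, m) kv = (cl ++ [(kv.1, kv.2)], m) := by
            simp [findStepA, hlen, h2, hgt]
          simp only [hA]
          by_cases heq : kv.2 = m
          · have hB : findStepB count ((cl.filter (fun c => c.2 = m)).map Prod.fst, m) kv
                = ((cl.filter (fun c => c.2 = m)).map Prod.fst ++ [kv.1], m) := by
              simp [findStepB, hlen', heq]
              omega
            simp only [hB]
            have hfil : ((cl ++ [(kv.1, kv.2)]).filter (fun c => c.2 = m)).map Prod.fst
                = (cl.filter (fun c => c.2 = m)).map Prod.fst ++ [kv.1] := by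
              simp [List.filter_append, heq]
            have := ih (cl ++ [(kv.1, kv.2)]) m hm
              (by intro x hx; rcases List.mem_append.mp hx with h | h
                  · exact hb x h
                  · simp at h; simp [h]; omega)
            simpa only [hfil] using this
          · have hlt : kv.2 < m := lt_of_le_of_ne (not_lt.mp hgt) heq
            have hB : findStepB count ((cl.filter (fun c => c.2 = m)).map Prod.fst, m) kv
                = ((cl.filter (fun c => c.2 = m)).map Prod.fst, m) := by
              simp [findStepB, hlen', h2, heq, not_lt.mpr (le_of_lt hlt)]
            simp only [hB]
            have hfil : ((cl ++ [(kv.1, kv.2)]).filter (fun c => c.2 = m)).map Prod.fst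
                = (cl.filter (fun c => c.2 = m)).map Prod.fst := by
              simp [List.filter_append, heq]
            have := ih (cl ++ [(kv.1, kv.2)]) m hm
              (by intro x hx; rcases List.mem_append.mp hx with h | h
                  · exact hb x h
                  · simp at h; simp [h]; omega)
            simpa only [hfil] using this
      · -- value < 2: nothing changes in either fold (note kv.2 > m impossible since m ≥ 2)
        have hA : findStepA count (cl, m) kv = (cl, m) := by
          simp [findStepA, hlen, h2]
          omega
        have hB : findStepB count ((cl.filter (fun c => c.2 = m)).map Prod.fst, m) kv
            = ((cl.filter (fun c => c.2 = m)).map Prod.fst, m) := by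
          simp [findStepB, h2]
        simp only [hA, hB]
        exact ih cl m hm hb
    · -- wrong key length: skipped by both
      have hlen' : ¬count = (kv.1.length : Int) := by simpa using hlen
      have hA : findStepA count (cl, m) kv = (cl, m) := by
        simp [findStepA, hlen']
      have hB : findStepB count ((cl.filter (fun c => c.2 = m)).map Prod.fst, m) kv
          = ((cl.filter (fun c => c.2 = m)).map Prod.fst, m) := by
        unfold findStepB
        rw [if_neg (fun hc => hlen hc.1.symm)]
      simp only [hA, hB]
      exact ih cl m hm hb

-- ===== VERDICT (by name: the statement is the Claim_ definition above) =====
theorem find_spec : Claim_equal_find := by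
  intro count answer_dict _
  unfold Spec_find find find_alt
  have h := fold_invariant count answer_dict [] 2 (le_refl _) (by intro x hx; simp at hx)
  simp only [List.filter_nil, List.map_nil] at h
  rw [h.1]
  exact (filterLoop_eq _ [] _).trans (by simp)
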